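-- pv_equiv track=rewrite | github.com/iulianbadoi/Crypto | crypto_trade_utils/scrape_cryptos_summaries.py | upperOnly
-- ===== SOURCE A (Python) =====
-- def upperOnly(s):
--     onlyCaps = ""
--     wasGood = False
--     for char in s:
--         if char == '(':
--             wasGood = True
--         if char.isupper() == True and wasGood:
--             onlyCaps += char
--
--     return onlyCaps
-- ===== SOURCE B (Python) =====
-- def upperOnly(s):
--     i = s.find('(')
--     if i == -1:
--         return ''
--     return ''.join(c for c in s[i+1:] if c.isupper())
-- ===== Notes on version B (the rewrite author's own statement) =====
-- stated objective: simpler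
-- what changed: Replaces the latching wasGood flag and the single running loop with a one-shot find('(') followed by an uppercase filter over the suffix after it.
import Mathlib
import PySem

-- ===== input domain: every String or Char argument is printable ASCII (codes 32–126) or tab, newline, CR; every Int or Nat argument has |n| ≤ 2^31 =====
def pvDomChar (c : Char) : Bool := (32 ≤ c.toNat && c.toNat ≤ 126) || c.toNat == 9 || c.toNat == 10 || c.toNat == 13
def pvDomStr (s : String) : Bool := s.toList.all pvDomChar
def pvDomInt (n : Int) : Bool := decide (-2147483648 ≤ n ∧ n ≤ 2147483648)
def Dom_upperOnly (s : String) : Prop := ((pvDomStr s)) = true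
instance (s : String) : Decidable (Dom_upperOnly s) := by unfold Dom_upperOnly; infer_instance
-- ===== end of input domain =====

-- B locates the first '(' once and filters the suffix for uppercase chars, replacing A's latching flag; objective: simpler.

-- ===== PORT A =====
-- one iteration of A's loop: update the latch, then append the char if it passes
def stepA (st : List Char × Bool) (char : Char) : List Char × Bool :=
  let wasGood := if char = '(' then true else st.2
  let onlyCaps := if PySem.Chars.isupper char && wasGood then st.1 ++ [char] else st.1
  (onlyCaps, wasGood)

def upperOnly (s : String) : String :=
  let r := s.toList.foldl stepA ([], false)
  String.ofList r.1

-- ===== PORT B =====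
def upperOnly_alt (s : String) : String :=
  let i := PySem.Str.find s "("
  if i = -1 then ""
  else String.ofList ((PySem.List.slice s.toList (some (i + 1)) none).filter (fun c => PySem.Chars.isupper c))

-- ===== PRECONDITION & SPEC =====
def Spec_upperOnly (s : String) (out : String) : Prop := out = upperOnly_alt s
instance (s : String) (out : String) : Decidable (Spec_upperOnly s out) := by unfold Spec_upperOnly; infer_instance

-- ===== CLAIM (what is proved, stated in full; the proofs are below) =====
def Claim_equal_upperOnly : Prop := ∀ (s : String), Dom_upperOnly s → Spec_upperOnly s (upperOnly s)

-- ===== LEMMAS AND PROOFS =====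

-- A's loop as a pure recursion (no accumulator)
def goA : List Char → Bool → List Char
  | [], _ => []
  | c :: cs, good =>
      let good' := if c = '(' then true else good
      (if PySem.Chars.isupper c && good' then [c] else []) ++ goA cs good'

theorem foldl_goA (cs : List Char) (acc : List Char) (good : Bool) :
    (cs.foldl stepA (acc, good)).1 = acc ++ goA cs good := by
  induction cs generalizing acc good with
  | nil => simp [goA]
  | cons c cs ih =>
      rw [List.foldl_cons]
      have h := ih (stepA (acc, good) c).1 (stepA (acc, good) c).2
      rw [Prod.mk.eta] at h
      rw [h]
      simp only [stepA, goA]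
      split_ifs <;> simp

theorem goA_true (cs : List Char) :
    goA cs true = cs.filter (fun c => PySem.Chars.isupper c) := by
  induction cs with
  | nil => simp [goA]
  | cons c cs ih =>
      by_cases h : PySem.Chars.isupper c = true <;> simp [goA, h, ih]

theorem goA_no_paren (cs : List Char) (h : '(' ∉ cs) : goA cs false = [] := by
  induction cs with
  | nil => simp [goA]
  | cons c cs ih =>
      simp only [List.mem_cons, not_or] at h
      have hc : c ≠ '(' := fun e => h.1 e.symm
      simp [goA, hc, ih h.2]

theorem goA_skip (cs : List Char) (n : Nat)
    (h1 : ∀ i < n, ¬ (['('] <+: cs.drop i)) (h2 : ['('] <+: cs.drop n) :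
    goA cs false = (cs.drop (n + 1)).filter (fun c => PySem.Chars.isupper c) := by
  induction cs generalizing n with
  | nil => simp at h2
  | cons c cs ih =>
      cases n with
      | zero =>
          simp only [List.drop_zero] at h2
          obtain ⟨t, ht⟩ := h2
          simp only [List.singleton_append] at ht
          have hc : c = '(' := ((List.cons_eq_cons.mp ht).1).symm
          subst hc
          have : PySem.Chars.isupper '(' = false := by decide
          simp [goA, this, goA_true]
      | succ m =>
          have hc : c ≠ '(' := by
            intro hc
            exact h1 0 (Nat.succ_pos m) ⟨cs, by simp [hc]⟩
          have h1' : ∀ i < m, ¬ (['('] <+: cs.drop i) := by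
            intro i hi
            have := h1 (i + 1) (by omega)
            simpa using this
          have h2' : ['('] <+: cs.drop m := by simpa using h2
          simp [goA, hc, ih m h1' h2']

-- singleton infix ↔ membership
theorem singleton_infix_iff (a : Char) (l : List Char) : [a] <:+: l ↔ a ∈ l := by
  constructor
  · intro h; exact h.subset (by simp)
  · intro h
    obtain ⟨s, t, rfl⟩ := List.append_of_mem h
    exact ⟨s, t, by simp⟩

-- ===== VERDICT (by name: the statement is the Claim_ definition above) =====
theorem upperOnly_spec : Claim_equal_upperOnly := by
  intro s _
  unfold Spec_upperOnly upperOnly upperOnly_alt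
  simp only [PySem.Str.find_eq]
  have htl : ("(" : String).toList = ['('] := by decide
  rw [htl, foldl_goA]
  by_cases h : PySem.Chars.find s.toList ['('] = -1
  · have hnot : ¬ (['('] <:+: s.toList) := (PySem.Chars.find_eq_neg_one_iff _ _).mp h
    have hmem : '(' ∉ s.toList := fun hm => hnot ((singleton_infix_iff _ _).mpr hm)
    simp [h, goA_no_paren _ hmem]
  · have hpos : 0 ≤ PySem.Chars.find s.toList ['('] :=
      (PySem.Chars.find_nonneg_iff _ _).mpr ((PySem.Chars.find_ne_neg_one_iff _ _).mp h)
    obtain ⟨hpre, hmin⟩ := PySem.Chars.find_spec hpos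
    have hA := goA_skip s.toList (PySem.Chars.find s.toList ['(']).toNat
      (fun i hi => hmin i hi) hpre
    have hslice : PySem.List.slice s.toList (some (PySem.Chars.find s.toList ['('] + 1)) none
        = s.toList.drop ((PySem.Chars.find s.toList ['(']).toNat + 1) := by
      rw [PySem.List.slice_from]
      · congr 1
        omega
      · omega
    simp [h, hA, hslice]
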